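-- pv_equiv track=rewrite | github.com/David-5-5/tutorial | python/algo/leecode2/algo2977.py | minimumCost2
-- ===== SOURCE A (Python) =====
-- from math import inf
-- from typing import List
-- from functools import cache, lru_cache
--
-- def minimumCost2(source: str, target: str, original: List[str], changed: List[str], cost: List[int]) -> int:
--     # original + changed 字符串 -> id
--     # vectex[len]["xxx"] = 0,
--     # original[0] changed[0] "abc" -> "cdc"
--     # vectex[3]["abc"] = 0 vectex[3]["cdc"] = 1
--     # w[3][0][1] = cost[0] 其中 3 字符长度, 0:"abc", 1:"cdc"
--     vectex = {}
--     for ch in original + changed: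
--         lt = len(ch)
--         if lt not in vectex:
--             vectex[lt] = {}
--             vectex[lt][ch] = 0
--         else:
--             if ch not in vectex[lt]:
--                 vectex[lt][ch] = len(vectex[lt])
--
--     # Begin Floyd 递推 + 降维 模板
--     # 按照 original changed 字符长度 分组
--     w = {}
--     for lt in vectex.keys():
--         w[lt] = [[0 if i == j else inf for j in range(len(vectex[lt]))] for i in range(len(vectex[lt]))]
--
--     for u, v, wt in zip(original, changed, cost):
--         lt = len(u)
--         u, v = vectex[lt][u], vectex[lt][v]
--         if wt < w[lt][u][v] : w[lt][u][v] = wt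
--
--     for lt in vectex.keys():
--         n = len(vectex[lt])
--         for k in range(n):
--             for i in range(n):
--                 for j in range(n):
--                     w[lt][i][j] = min(w[lt][i][j], w[lt][i][k]+w[lt][k][j])
--     # End Floyd 模板
--
--     @cache
--     def dfs(i:int): # i表示剩余字符长度，i-1为最后字符
--         if i == 0:
--             return 0
--         res = inf
--         if source[i-1] == target[i-1]:
--             res = dfs(i-1)
--
--         for lt in vectex.keys():
--             if lt > i:continue # 长度超出
--
--             if source[i-lt:i] in vectex[lt] and target[i-lt:i] in vectex[lt]:
--                 u, v = vectex[lt][source[i-lt:i]], vectex[lt][target[i-lt:i]]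
--                 res = min(res, w[lt][u][v] + dfs(i-lt))
--
--         return res
--
--     ans = dfs(len(source))
--     return ans if ans < inf else -1
-- ===== SOURCE B (Python) =====
-- def minimumCost2(source, target, original, changed, cost):
--     # bucket the distinct operation strings by length (first-appearance order),
--     # then number each bucket in one comprehension
--     buckets = {}
--     for s in original + changed:
--         g = buckets.setdefault(len(s), [])
--         if s not in g:
--             g.append(s)
--     idx = {lt: {s: i for i, s in enumerate(g)} for lt, g in buckets.items()}
--
--     # per-length cheapest conversions as SPARSE dicts keyed by id pairs
--     # (a missing pair / a None means unreachable -- no inf sentinel anywhere)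
--     dist = {lt: {(i, i): 0 for i in range(len(d))} for lt, d in idx.items()}
--     for u, v, c in zip(original, changed, cost):
--         lt = len(u)
--         key = (idx[lt][u], idx[lt][v])
--         d = dist[lt]
--         if key not in d or c < d[key]:
--             d[key] = c
--     for lt, d in dist.items():
--         n = len(idx[lt])
--         for k in range(n):
--             for i in range(n):
--                 for j in range(n):
--                     a = d.get((i, k))
--                     b = d.get((k, j))
--                     if a is not None and b is not None:
--                         cand = a + b
--                         if (i, j) not in d or cand < d[(i, j)]:
--                             d[(i, j)] = cand
--
--     # bottom-up DP over prefix lengths, None = not reachable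
--     n = len(source)
--     dp = [0] + [None] * n
--     for i in range(1, n + 1):
--         best = dp[i - 1] if source[i - 1] == target[i - 1] else None
--         for lt, d in idx.items():
--             su, tv = source[i - lt:i], target[i - lt:i]
--             if lt <= i and su in d and tv in d:
--                 c = dist[lt].get((d[su], d[tv]))
--                 if c is not None:
--                     prev = dp[i - lt]
--                     if prev is not None:
--                         cand = c + prev
--                         if best is None or cand < best:
--                             best = cand
--         dp[i] = best
--     return dp[n] if dp[n] is not None else -1
-- ===== Notes on version B (the rewrite author's own statement) =====
-- stated objective: alternative
-- what changed: B keeps the per-length id numbering (built from bucket lists via an enumerate comprehension) but stores all-pairs conversion costs in SPARSE dicts keyed by id pairs relaxed in place with get()-guarded Floyd updates instead of A's dense identity/inf matrices with unconditional min-writes, and replaces A's memoized top-down dfs recursion by an explicit bottom-up DP array with None sentinels (no inf anywhere).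
import Mathlib
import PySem

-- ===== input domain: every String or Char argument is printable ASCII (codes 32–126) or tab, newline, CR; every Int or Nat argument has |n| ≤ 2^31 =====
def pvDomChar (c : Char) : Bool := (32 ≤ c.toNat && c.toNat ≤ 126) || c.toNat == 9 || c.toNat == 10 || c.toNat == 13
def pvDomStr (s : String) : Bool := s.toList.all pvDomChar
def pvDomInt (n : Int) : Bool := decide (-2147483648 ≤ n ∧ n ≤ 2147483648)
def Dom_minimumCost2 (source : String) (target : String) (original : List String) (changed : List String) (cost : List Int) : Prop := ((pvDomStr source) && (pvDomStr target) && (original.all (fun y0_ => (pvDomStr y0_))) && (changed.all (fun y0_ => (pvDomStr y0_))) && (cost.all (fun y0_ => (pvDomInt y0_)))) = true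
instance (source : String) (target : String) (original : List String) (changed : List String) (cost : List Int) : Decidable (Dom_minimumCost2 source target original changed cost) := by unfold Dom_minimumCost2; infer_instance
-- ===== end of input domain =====

-- B replaces A's dense id-indexed matrices with inf sentinels by sparse dicts of finite costs
-- keyed by id pairs (a missing pair = unreachable) relaxed in place, and A's memoized top-down
-- dfs by a bottom-up DP array (objective: alternative; return value only — A mutates nothing).

-- ===== PORT A =====
-- A-side arithmetic on "int or math.inf" values (none = inf), exact for Python's int/inf mix
def pvEAdd : Option Int → Option Int → Option Int
  | some a, some b => some (a + b)
  | _, _ => none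

def pvELt : Option Int → Option Int → Bool
  | some a, some b => decide (a < b)
  | some _, none => true
  | none, _ => false

-- Python's min(a, b): b exactly when b < a
def pvEMin (a b : Option Int) : Option Int := if pvELt b a then b else a

-- [[0 if i == j else inf for j in range(n)] for i in range(n)]
def pvMat (n : Int) : List (List (Option Int)) :=
  (PySem.List.pyRange 0 n 1).map (fun i =>
    (PySem.List.pyRange 0 n 1).map (fun j => if i == j then (some 0 : Option Int) else none))

-- A phase 1: vectex grouping loop, branch for branch
def pvVectexA (l : List String) : PySem.Dict Int (PySem.Dict String Int) :=
  l.foldl (fun vx ch =>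
    let lt := PySem.Str.len ch
    if vx.contains lt = false then
      vx.insert lt ((PySem.Dict.empty).insert ch 0)
    else
      if (vx.getD lt PySem.Dict.empty).contains ch = false then
        vx.modify lt PySem.Dict.empty (fun d => d.insert ch ((d.size : Int)))
      else vx) PySem.Dict.empty

-- A phase 2: w[lt] = identity/inf matrix, looping over vectex.keys()
def pvWInitA (vx : PySem.Dict Int (PySem.Dict String Int)) : PySem.Dict Int (List (List (Option Int))) :=
  vx.keys.foldl (fun w lt => w.insert lt (pvMat ((vx.getD lt PySem.Dict.empty).size : Int))) PySem.Dict.empty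

-- A phase 3: 'if wt < w[lt][u][v]: w[lt][u][v] = wt' over zip(original, changed, cost)
def pvEdgesA (vx : PySem.Dict Int (PySem.Dict String Int)) (edges : List (String × String × Int))
    (w : PySem.Dict Int (List (List (Option Int)))) : PySem.Dict Int (List (List (Option Int))) :=
  edges.foldl (fun w t =>
    let lt := PySem.Str.len t.1
    let u := (vx.getD lt PySem.Dict.empty).getD t.1 0
    let v := (vx.getD lt PySem.Dict.empty).getD t.2.1 0
    let m := w.getD lt []
    if pvELt (some t.2.2) (PySem.List.pyGetD (PySem.List.pyGetD m u []) v none) then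
      w.insert lt (PySem.List.pySetD m u (PySem.List.pySetD (PySem.List.pyGetD m u []) v (some t.2.2)))
    else w) w

-- A phase 4: Floyd, 'w[lt][i][j] = min(w[lt][i][j], w[lt][i][k]+w[lt][k][j])'
def pvFloydA (vx : PySem.Dict Int (PySem.Dict String Int))
    (w : PySem.Dict Int (List (List (Option Int)))) : PySem.Dict Int (List (List (Option Int))) :=
  vx.keys.foldl (fun w lt =>
    let n : Int := ((vx.getD lt PySem.Dict.empty).size : Int)
    (PySem.List.pyRange 0 n 1).foldl (fun w k =>
      (PySem.List.pyRange 0 n 1).foldl (fun w i =>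
        (PySem.List.pyRange 0 n 1).foldl (fun w j =>
          let m := w.getD lt []
          let cur := PySem.List.pyGetD (PySem.List.pyGetD m i []) j none
          let alt := pvEAdd (PySem.List.pyGetD (PySem.List.pyGetD m i []) k none)
                            (PySem.List.pyGetD (PySem.List.pyGetD m k []) j none)
          w.insert lt (PySem.List.pySetD m i (PySem.List.pySetD (PySem.List.pyGetD m i []) j (pvEMin cur alt)))) w) w) w) w

-- A phase 5: the @cache'd dfs, as plain recursion on the prefix length (the cache only speeds it up).
-- The '1 ≤ lt' conjunct in the filter is a totality guard: on a length-0 key Python's dfs(i) would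
-- call dfs(i - 0) and recurse forever (RecursionError — outside Pre_).
def pvDfsA (source target : String) (vx : PySem.Dict Int (PySem.Dict String Int))
    (w : PySem.Dict Int (List (List (Option Int)))) : Nat → Option Int
  | 0 => some 0
  | (i+1) =>
    let res : Option Int :=
      if source.toList[i]? == target.toList[i]? then pvDfsA source target vx w i else none
    (vx.keys.filter (fun lt => decide (1 ≤ lt) && !decide (lt > ((i : Int) + 1)))).attach.foldl
      (fun res lt =>
        let d := vx.getD lt.1 PySem.Dict.empty
        let su := PySem.Str.slice source (some ((i : Int) + 1 - lt.1)) (some ((i : Int) + 1))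
        let tv := PySem.Str.slice target (some ((i : Int) + 1 - lt.1)) (some ((i : Int) + 1))
        if d.contains su && d.contains tv then
          pvEMin res (pvEAdd
            (PySem.List.pyGetD (PySem.List.pyGetD (w.getD lt.1 []) (d.getD su 0) []) (d.getD tv 0) none)
            (pvDfsA source target vx w (i + 1 - lt.1.toNat)))
        else res) res
  termination_by i => i
  decreasing_by
    · omega
    · have h := lt.2; simp only [List.mem_filter, Bool.and_eq_true, decide_eq_true_eq] at h; omega

def minimumCost2 (source : String) (target : String) (original : List String) (changed : List String) (cost : List Int) : Int :=
  let vectex := pvVectexA (original ++ changed)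
  let w := pvWInitA vectex
  let w := pvEdgesA vectex (List.zip original (List.zip changed cost)) w
  let w := pvFloydA vectex w
  match pvDfsA source target vectex w source.toList.length with
  | some a => a
  | none => -1

-- ===== PORT B =====
-- Source B is one function; its port is one def: bucket + number (phase 1), sparse diag init
-- (phase 2), edge relaxation (phase 3), sparse Floyd (phase 4), bottom-up dp (phase 5).
def minimumCost2_alt (source : String) (target : String) (original : List String) (changed : List String) (cost : List Int) : Int :=
  let buckets := (original ++ changed).foldl (fun gr s =>
    let lt := PySem.Str.len s
    let gr := gr.setdefault lt []
    let g := gr.getD lt []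
    if g.contains s = false then gr.insert lt (g ++ [s]) else gr) PySem.Dict.empty
  let idx := buckets.items.foldl (fun idx p =>
    idx.insert p.1 ((PySem.List.enumerate p.2 0).foldl (fun d q => d.insert q.2 q.1) PySem.Dict.empty)) PySem.Dict.empty
  let dist := idx.items.foldl (fun dist p =>
    dist.insert p.1 ((PySem.List.pyRange 0 ((p.2.size : Int)) 1).foldl (fun d i => d.insert (i, i) 0) PySem.Dict.empty)) PySem.Dict.empty
  let dist := (List.zip original (List.zip changed cost)).foldl (fun dist t =>
    let lt := PySem.Str.len t.1
    let key := ((idx.getD lt PySem.Dict.empty).getD t.1 0, (idx.getD lt PySem.Dict.empty).getD t.2.1 0)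
    let d := dist.getD lt PySem.Dict.empty
    if !(d.contains key) || decide (t.2.2 < d.getD key 0) then
      dist.insert lt (d.insert key t.2.2)
    else dist) dist
  let dist := dist.items.foldl (fun dist p =>
    let n : Int := ((idx.getD p.1 PySem.Dict.empty).size : Int)
    (PySem.List.pyRange 0 n 1).foldl (fun dist k =>
      (PySem.List.pyRange 0 n 1).foldl (fun dist i =>
        (PySem.List.pyRange 0 n 1).foldl (fun dist j =>
          let d := dist.getD p.1 PySem.Dict.empty
          match d.get? (i, k), d.get? (k, j) with
          | some a, some b =>
            if !(d.contains (i, j)) || decide (a + b < d.getD (i, j) 0) then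
              dist.insert p.1 (d.insert (i, j) (a + b))
            else dist
          | _, _ => dist) dist) dist) dist) dist
  let n : Int := PySem.Str.len source
  let dp := (PySem.List.pyRange 1 (n + 1) 1).foldl (fun dp i =>
    let best : Option Int :=
      if PySem.List.pyGet? source.toList (i - 1) == PySem.List.pyGet? target.toList (i - 1) then
        PySem.List.pyGetD dp (i - 1) none
      else none
    let best := idx.items.foldl (fun best p =>
      let su := PySem.Str.slice source (some (i - p.1)) (some i)
      let tv := PySem.Str.slice target (some (i - p.1)) (some i)
      if decide (p.1 ≤ i) && p.2.contains su && p.2.contains tv then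
        match (dist.getD p.1 PySem.Dict.empty).get? (p.2.getD su 0, p.2.getD tv 0) with
        | some c =>
          match PySem.List.pyGetD dp (i - p.1) none with
          | some prev =>
            let cand := c + prev
            if best == none || decide (cand < best.getD 0) then some cand else best
          | none => best
        | none => best
      else best) best
    PySem.List.pySetD dp i best) (some 0 :: List.replicate n.toNat none)
  match PySem.List.pyGetD dp n none with
  | some a => a
  | none => -1

-- ===== PRECONDITION & SPEC =====
-- Pre_ excludes exactly the inputs on which Python A raises: a zipped pair of operation strings of
-- different lengths (KeyError in vectex[lt][v]), and — when source is nonempty — a target shorter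
-- than source (IndexError at target[i-1]) or an empty operation string (dfs(i) calls dfs(i-0):
-- RecursionError).
def Pre_minimumCost2 (source : String) (target : String) (original : List String) (changed : List String) (cost : List Int) : Prop :=
  (∀ p ∈ List.zip original (List.zip changed cost), p.1.toList.length = p.2.1.toList.length) ∧
  (source.toList = [] ∨
    (source.toList.length ≤ target.toList.length ∧ ∀ s ∈ original ++ changed, s.toList ≠ []))

instance (source : String) (target : String) (original : List String) (changed : List String) (cost : List Int) : Decidable (Pre_minimumCost2 source target original changed cost) := by
  unfold Pre_minimumCost2; infer_instance

def pvWitness_minimumCost2 : String × String × List String × List String × List Int :=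
  ("ab", "cb", ["a"], ["c"], [1])

def Spec_minimumCost2 (source : String) (target : String) (original : List String) (changed : List String) (cost : List Int) (out : Int) : Prop := out = minimumCost2_alt source target original changed cost
instance (source : String) (target : String) (original : List String) (changed : List String) (cost : List Int) (out : Int) : Decidable (Spec_minimumCost2 source target original changed cost out) := by unfold Spec_minimumCost2; infer_instance

-- ===== CLAIM (what is proved, stated in full; the proofs are below) =====
def Claim_equal_minimumCost2 : Prop := ∀ (source : String) (target : String) (original : List String) (changed : List String) (cost : List Int), Dom_minimumCost2 source target original changed cost → Pre_minimumCost2 source target original changed cost → Spec_minimumCost2 source target original changed cost (minimumCost2 source target original changed cost)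

-- ===== LEMMAS AND PROOFS =====

-- proof-side names for the phases of minimumCost2_alt (definitionally equal to its let-chain)
def pvGroupsB (l : List String) : PySem.Dict Int (List String) :=
  l.foldl (fun gr s =>
    let lt := PySem.Str.len s
    let gr := gr.setdefault lt []
    let g := gr.getD lt []
    if g.contains s = false then gr.insert lt (g ++ [s]) else gr) PySem.Dict.empty

def pvIdxB (gr : PySem.Dict Int (List String)) : PySem.Dict Int (PySem.Dict String Int) :=
  gr.items.foldl (fun idx p =>
    idx.insert p.1 ((PySem.List.enumerate p.2 0).foldl (fun d q => d.insert q.2 q.1) PySem.Dict.empty)) PySem.Dict.empty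

def pvDiagN (n : Int) : PySem.Dict (Int × Int) Int :=
  (PySem.List.pyRange 0 n 1).foldl (fun d i => d.insert (i, i) 0) PySem.Dict.empty

def pvDistInitB (vx : PySem.Dict Int (PySem.Dict String Int)) : PySem.Dict Int (PySem.Dict (Int × Int) Int) :=
  vx.items.foldl (fun dist p => dist.insert p.1 (pvDiagN ((p.2.size : Int)))) PySem.Dict.empty

def pvEdgesB (vx : PySem.Dict Int (PySem.Dict String Int)) (edges : List (String × String × Int))
    (dist : PySem.Dict Int (PySem.Dict (Int × Int) Int)) : PySem.Dict Int (PySem.Dict (Int × Int) Int) :=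
  edges.foldl (fun dist t =>
    let lt := PySem.Str.len t.1
    let key := ((vx.getD lt PySem.Dict.empty).getD t.1 0, (vx.getD lt PySem.Dict.empty).getD t.2.1 0)
    let d := dist.getD lt PySem.Dict.empty
    if !(d.contains key) || decide (t.2.2 < d.getD key 0) then
      dist.insert lt (d.insert key t.2.2)
    else dist) dist

def pvFloydB (vx : PySem.Dict Int (PySem.Dict String Int))
    (dist : PySem.Dict Int (PySem.Dict (Int × Int) Int)) : PySem.Dict Int (PySem.Dict (Int × Int) Int) :=
  dist.items.foldl (fun dist p =>
    let n : Int := ((vx.getD p.1 PySem.Dict.empty).size : Int)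
    (PySem.List.pyRange 0 n 1).foldl (fun dist k =>
      (PySem.List.pyRange 0 n 1).foldl (fun dist i =>
        (PySem.List.pyRange 0 n 1).foldl (fun dist j =>
          let d := dist.getD p.1 PySem.Dict.empty
          match d.get? (i, k), d.get? (k, j) with
          | some a, some b =>
            if !(d.contains (i, j)) || decide (a + b < d.getD (i, j) 0) then
              dist.insert p.1 (d.insert (i, j) (a + b))
            else dist
          | _, _ => dist) dist) dist) dist) dist

def pvDpB (source target : String) (vx : PySem.Dict Int (PySem.Dict String Int))
    (dist : PySem.Dict Int (PySem.Dict (Int × Int) Int)) : List (Option Int) :=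
  let n : Int := PySem.Str.len source
  (PySem.List.pyRange 1 (n + 1) 1).foldl (fun dp i =>
    let best : Option Int :=
      if PySem.List.pyGet? source.toList (i - 1) == PySem.List.pyGet? target.toList (i - 1) then
        PySem.List.pyGetD dp (i - 1) none
      else none
    let best := vx.items.foldl (fun best p =>
      let su := PySem.Str.slice source (some (i - p.1)) (some i)
      let tv := PySem.Str.slice target (some (i - p.1)) (some i)
      if decide (p.1 ≤ i) && p.2.contains su && p.2.contains tv then
        match (dist.getD p.1 PySem.Dict.empty).get? (p.2.getD su 0, p.2.getD tv 0) with
        | some c =>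
          match PySem.List.pyGetD dp (i - p.1) none with
          | some prev =>
            let cand := c + prev
            if best == none || decide (cand < best.getD 0) then some cand else best
          | none => best
        | none => best
      else best) best
    PySem.List.pySetD dp i best) (some 0 :: List.replicate n.toNat none)

-- the let-chain of minimumCost2_alt, phase by phase
theorem pv_alt_phases (source target : String) (original changed : List String) (cost : List Int) :
    minimumCost2_alt source target original changed cost
      = (match PySem.List.pyGetD
            (pvDpB source target (pvIdxB (pvGroupsB (original ++ changed)))
              (pvFloydB (pvIdxB (pvGroupsB (original ++ changed)))
                (pvEdgesB (pvIdxB (pvGroupsB (original ++ changed)))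
                  (List.zip original (List.zip changed cost))
                  (pvDistInitB (pvIdxB (pvGroupsB (original ++ changed)))))))
            (PySem.Str.len source) none with
         | some a => a
         | none => -1) := rfl


-- generic: two folds over the same list preserve a relation
theorem pvFoldRelMem {α σ τ : Type} (R : σ → τ → Prop) (L : List α) (fA : σ → α → σ) (fB : τ → α → τ)
    (h : ∀ x ∈ L, ∀ s t, R s t → R (fA s x) (fB t x)) :
    ∀ s t, R s t → R (L.foldl fA s) (L.foldl fB t) := by
  induction L with
  | nil => intro s t hst; exact hst
  | cons x L ih =>
    intro s t hst
    exact ih (fun y hy => h y (List.mem_cons_of_mem _ hy)) _ _ (h x (by simp) s t hst)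

-- generic: one fold preserves an invariant
theorem pvFoldInv {α σ : Type} (P : σ → Prop) (L : List α) (f : σ → α → σ)
    (h : ∀ x ∈ L, ∀ s, P s → P (f s x)) :
    ∀ s, P s → P (L.foldl f s) := by
  induction L with
  | nil => intro s hs; exact hs
  | cons x L ih =>
    intro s hs
    exact ih (fun y hy => h y (List.mem_cons_of_mem _ hy)) _ (h x (by simp) s hs)

-- correspondence between A's id dict and B's first-occurrence bucket (per length)
def pvRel (vxd : PySem.Dict String Int) (g : List String) : Prop :=
  vxd.items = g.zipIdx.map (fun p => (p.1, (p.2 : Int)))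

theorem pvRel_keys (vxd : PySem.Dict String Int) (g : List String) (h : pvRel vxd g) :
    vxd.keys = g := by
  show vxd.items.map (·.1) = g
  rw [h]
  simp [List.map_map, Function.comp_def]

theorem pvRel_size (vxd : PySem.Dict String Int) (g : List String) (h : pvRel vxd g) :
    vxd.size = g.length := by
  show vxd.items.length = g.length
  rw [h]
  simp

theorem pvRel_contains (vxd : PySem.Dict String Int) (g : List String) (h : pvRel vxd g) (s : String) :
    vxd.contains s = g.contains s := by
  rw [PySem.Dict.contains_eq_decide_mem_keys, pvRel_keys _ _ h, List.contains_eq_mem]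

-- A's phase 1 and B's phase 1a walk the input in lockstep
def pvGInv (vx : PySem.Dict Int (PySem.Dict String Int)) (gr : PySem.Dict Int (List String)) : Prop :=
  vx.keys = gr.keys ∧ gr.keys.Nodup ∧
  ∀ lt, (gr.getD lt []).Nodup ∧ pvRel (vx.getD lt PySem.Dict.empty) (gr.getD lt [])

theorem pv_ginv (l : List String) : pvGInv (pvVectexA l) (pvGroupsB l) := by
  unfold pvVectexA pvGroupsB
  refine pvFoldRelMem pvGInv l _ _ ?_ _ _
    ⟨rfl, List.nodup_nil, fun lt => ⟨by simp [PySem.Dict.getD_empty], by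
      unfold pvRel; simp [PySem.Dict.getD_empty]; rfl⟩⟩
  intro ch _ vx gr hR
  obtain ⟨hkeys, hnd, hlts⟩ := hR
  simp only
  have hcg : gr.contains (PySem.Str.len ch) = vx.contains (PySem.Str.len ch) := by
    rw [PySem.Dict.contains_eq_decide_mem_keys, PySem.Dict.contains_eq_decide_mem_keys, hkeys]
  by_cases hc : vx.contains (PySem.Str.len ch) = true
  · -- the length is already a key
    rw [if_neg (by rw [hc]; simp), PySem.Dict.setdefault_of_contains _ _ (by rw [hcg, hc])]
    have hin : (vx.getD (PySem.Str.len ch) PySem.Dict.empty).contains ch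
        = (gr.getD (PySem.Str.len ch) []).contains ch :=
      pvRel_contains _ _ (hlts (PySem.Str.len ch)).2 ch
    by_cases hch : (vx.getD (PySem.Str.len ch) PySem.Dict.empty).contains ch = true
    · rw [if_neg (by rw [hch]; simp), if_neg (by rw [← hin, hch]; simp)]
      exact ⟨hkeys, hnd, hlts⟩
    · simp only [Bool.not_eq_true] at hch
      rw [if_pos hch, if_pos (by rw [← hin]; exact hch)]
      have hchg : ch ∉ gr.getD (PySem.Str.len ch) [] := by
        intro hmem
        rw [hch, Eq.comm, List.contains_eq_mem, decide_eq_false_iff_not] at hin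
        exact hin hmem
      refine ⟨?_, ?_, ?_⟩
      · rw [PySem.Dict.keys_modify, PySem.Dict.keys_insert_of_contains _ _ hc,
          PySem.Dict.keys_insert_of_contains _ _ (by rw [hcg, hc])]
        exact hkeys
      · rw [PySem.Dict.keys_insert_of_contains _ _ (by rw [hcg, hc])]
        exact hnd
      · intro lt'
        by_cases hlt' : lt' = PySem.Str.len ch
        · rw [hlt', PySem.Dict.getD_modify_self, PySem.Dict.getD_insert_self]
          refine ⟨List.Nodup.append (hlts _).1 (by simp)
            (fun a ha hb => by rw [List.mem_singleton] at hb; subst hb; exact hchg ha), ?_⟩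
          unfold pvRel
          rw [PySem.Dict.items_insert_of_not_contains _ _ hch, (hlts _).2,
            List.zipIdx_append, List.map_append]
          congr 1
          rw [pvRel_size _ _ (hlts (PySem.Str.len ch)).2]
          simp [List.zipIdx_cons]
        · rw [PySem.Dict.getD_modify_of_ne _ _ _ hlt', PySem.Dict.getD_insert_of_ne _ _ _ hlt']
          exact hlts lt'
  · -- a fresh length key
    simp only [Bool.not_eq_true] at hc
    have hcg' : gr.contains (PySem.Str.len ch) = false := by rw [hcg, hc]
    rw [if_pos hc, PySem.Dict.setdefault_of_not_contains _ _ hcg',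
      PySem.Dict.getD_insert_self]
    rw [if_pos (by simp), PySem.Dict.insert_insert_self, List.nil_append]
    have hmemk : PySem.Str.len ch ∉ gr.keys := by
      intro hmem
      rw [PySem.Dict.contains_eq_decide_mem_keys, decide_eq_false_iff_not] at hcg'
      exact hcg' hmem
    refine ⟨?_, ?_, ?_⟩
    · rw [PySem.Dict.keys_insert_of_not_contains _ _ hc, PySem.Dict.keys_insert_of_not_contains _ _ hcg',
        hkeys]
    · rw [PySem.Dict.keys_insert_of_not_contains _ _ hcg']
      exact List.Nodup.append hnd (by simp)
        (fun a ha hb => by rw [List.mem_singleton] at hb; subst hb; exact hmemk ha)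
    · intro lt'
      by_cases hlt' : lt' = PySem.Str.len ch
      · rw [hlt', PySem.Dict.getD_insert_self, PySem.Dict.getD_insert_self]
        refine ⟨by simp, ?_⟩
        unfold pvRel
        rw [PySem.Dict.items_insert_of_not_contains _ _ (by simp)]
        simp [List.zipIdx_cons, PySem.Dict.empty]
      · rw [PySem.Dict.getD_insert_of_ne _ _ _ hlt', PySem.Dict.getD_insert_of_ne _ _ _ hlt']
        exact hlts lt'

-- numbering a bucket with enumerate reproduces its zipIdx pairing
theorem pv_enumerate_swap (g : List String) : ∀ (k : Nat),
    (PySem.List.enumerate g ((k : Nat) : Int)).map (fun q => (q.2, q.1))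
      = (g.zipIdx k).map (fun p => (p.1, (p.2 : Int))) := by
  induction g with
  | nil => intro k; simp [PySem.List.enumerate_nil]
  | cons x g ih =>
    intro k
    rw [PySem.List.enumerate_cons, List.zipIdx_cons, List.map_cons, List.map_cons]
    have hk : ((k : Nat) : Int) + 1 = (((k + 1 : Nat)) : Int) := by push_cast; ring
    rw [hk, ih (k + 1)]

-- B's comprehension over the buckets rebuilds A's id dictionary exactly
theorem pv_idx_eq (l : List String) : pvIdxB (pvGroupsB l) = pvVectexA l := by
  obtain ⟨hkeys, hnd, hlts⟩ := pv_ginv l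
  have hvnd : (pvVectexA l).keys.Nodup := by rw [hkeys]; exact hnd
  have hBitems : (pvIdxB (pvGroupsB l)).items
      = (pvGroupsB l).items.map (fun p => (p.1,
          ((PySem.List.enumerate p.2 0).foldl (fun d q => d.insert q.2 q.1) PySem.Dict.empty))) := by
    unfold pvIdxB
    have := PySem.Dict.items_foldl_insert_fresh (pvGroupsB l).items (fun p => p.1)
      (fun p => ((PySem.List.enumerate p.2 0).foldl (fun d q => d.insert q.2 q.1) PySem.Dict.empty))
      PySem.Dict.empty (fun a _ => PySem.Dict.contains_empty a.1) hnd
    simpa using this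
  have hinner : ∀ (g : List String), g.Nodup →
      ((PySem.List.enumerate g 0).foldl (fun d q => d.insert q.2 q.1) PySem.Dict.empty).items
        = g.zipIdx.map (fun p => (p.1, (p.2 : Int))) := by
    intro g hgnd
    have hfresh := PySem.Dict.items_foldl_insert_fresh (PySem.List.enumerate g 0)
      (fun q => q.2) (fun q => q.1) (PySem.Dict.empty : PySem.Dict String Int)
      (fun a _ => PySem.Dict.contains_empty a.2)
      (by rw [PySem.List.map_snd_enumerate]; exact hgnd)
    rw [hfresh]
    have h0 : (0 : Int) = ((0 : Nat) : Int) := by norm_num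
    rw [show (PySem.Dict.empty : PySem.Dict String Int).items = [] from rfl, List.nil_append,
      h0, pv_enumerate_swap g 0]
  apply PySem.Dict.ext
  rw [hBitems, PySem.Dict.items_eq_map_keys (pvVectexA l) hvnd PySem.Dict.empty, hkeys,
    PySem.Dict.items_eq_map_keys (pvGroupsB l) hnd [], List.map_map]
  refine List.map_congr_left (fun lt hlt => ?_)
  simp only [Function.comp_apply]
  congr 1
  apply PySem.Dict.ext
  rw [hinner _ (hlts lt).1, (hlts lt).2]

-- invariants of the id dictionary: outer keys unique, inner keys unique, ids are 0..size-1
def pvIOK (vx : PySem.Dict Int (PySem.Dict String Int)) : Prop :=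
  vx.keys.Nodup ∧ ∀ lt, ((vx.getD lt PySem.Dict.empty).keys.Nodup ∧
    ∀ p ∈ (vx.getD lt PySem.Dict.empty).items, 0 ≤ p.2 ∧ p.2 < (((vx.getD lt PySem.Dict.empty).size : Nat) : Int))

theorem pv_vectexA_inv (l : List String) : pvIOK (pvVectexA l) := by
  unfold pvVectexA
  refine pvFoldInv pvIOK l _ ?_ _
    ⟨by simp [PySem.Dict.keys_empty], fun lt => ⟨by simp [PySem.Dict.getD_empty, PySem.Dict.keys_empty], by
      rw [PySem.Dict.getD_empty]
      intro p hp
      simp [PySem.Dict.empty] at hp⟩⟩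
  intro ch _ vx hP
  obtain ⟨hnd, hin⟩ := hP
  simp only
  by_cases hc : vx.contains (PySem.Str.len ch) = true
  · rw [if_neg (by rw [hc]; simp)]
    by_cases hch : (vx.getD (PySem.Str.len ch) PySem.Dict.empty).contains ch = true
    · rw [if_neg (by rw [hch]; simp)]
      exact ⟨hnd, hin⟩
    · simp only [Bool.not_eq_true] at hch
      rw [if_pos hch]
      refine ⟨?_, ?_⟩
      · rw [PySem.Dict.keys_modify, PySem.Dict.keys_insert_of_contains _ _ hc]
        exact hnd
      · intro lt'
        by_cases hlt' : lt' = PySem.Str.len ch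
        · rw [hlt', PySem.Dict.getD_modify_self]
          have hknd := (hin (PySem.Str.len ch)).1
          have hbnd := (hin (PySem.Str.len ch)).2
          have hchk : ch ∉ (vx.getD (PySem.Str.len ch) PySem.Dict.empty).keys := by
            intro hm
            rw [PySem.Dict.contains_eq_decide_mem_keys, decide_eq_false_iff_not] at hch
            exact hch hm
          have hitems := PySem.Dict.items_insert_of_not_contains
            (vx.getD (PySem.Str.len ch) PySem.Dict.empty)
            (((vx.getD (PySem.Str.len ch) PySem.Dict.empty).size : Int)) hch
          refine ⟨?_, ?_⟩
          · rw [PySem.Dict.keys_insert_of_not_contains _ _ hch]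
            exact List.Nodup.append hknd (by simp)
              (fun a ha hb => by rw [List.mem_singleton] at hb; subst hb; exact hchk ha)
          · intro p hp
            rw [hitems] at hp
            have hsz : ((vx.getD (PySem.Str.len ch) PySem.Dict.empty).insert ch
                (((vx.getD (PySem.Str.len ch) PySem.Dict.empty).size : Int))).size
                = (vx.getD (PySem.Str.len ch) PySem.Dict.empty).size + 1 := by
              show ((vx.getD (PySem.Str.len ch) PySem.Dict.empty).insert ch _).items.length = _
              rw [hitems]
              simp [PySem.Dict.size]
            rw [hsz]
            rcases List.mem_append.1 hp with hp | hp
            · have := hbnd p hp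
              constructor
              · exact this.1
              · push_cast
                omega
            · rw [List.mem_singleton] at hp
              subst hp
              constructor
              · positivity
              · push_cast
                omega
        · rw [PySem.Dict.getD_modify_of_ne _ _ _ hlt']
          exact hin lt'
  · simp only [Bool.not_eq_true] at hc
    rw [if_pos hc]
    have hmemk : PySem.Str.len ch ∉ vx.keys := by
      intro hm
      rw [PySem.Dict.contains_eq_decide_mem_keys, decide_eq_false_iff_not] at hc
      exact hc hm
    refine ⟨?_, ?_⟩
    · rw [PySem.Dict.keys_insert_of_not_contains _ _ hc]
      exact List.Nodup.append hnd (by simp)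
        (fun a ha hb => by rw [List.mem_singleton] at hb; subst hb; exact hmemk ha)
    · intro lt'
      by_cases hlt' : lt' = PySem.Str.len ch
      · rw [hlt', PySem.Dict.getD_insert_self]
        refine ⟨?_, ?_⟩
        · rw [PySem.Dict.keys_insert_of_not_contains _ _ (by simp)]
          simp [PySem.Dict.keys_empty]
        · intro p hp
          rw [PySem.Dict.items_insert_of_not_contains _ _ (by simp)] at hp
          have hp' : p = (ch, (0 : Int)) := by simpa [PySem.Dict.empty] using hp
          subst hp'
          refine ⟨le_refl _, ?_⟩
          have hsz1 : ((PySem.Dict.empty : PySem.Dict String Int).insert ch (0:Int)).size = 1 := rfl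
          rw [hsz1]
          norm_num
      · rw [PySem.Dict.getD_insert_of_ne _ _ _ hlt']
        exact hin lt'

-- every processed string ends up in its length group
theorem pv_vectex_mem_aux (l : List String) : ∀ (vx : PySem.Dict Int (PySem.Dict String Int)),
    (∀ lt s, (vx.getD lt PySem.Dict.empty).contains s = true →
      ((l.foldl (fun vx ch =>
        let lt := PySem.Str.len ch
        if vx.contains lt = false then
          vx.insert lt ((PySem.Dict.empty).insert ch 0)
        else
          if (vx.getD lt PySem.Dict.empty).contains ch = false then
            vx.modify lt PySem.Dict.empty (fun d => d.insert ch ((d.size : Int)))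
          else vx) vx).getD lt PySem.Dict.empty).contains s = true) ∧
    (∀ s ∈ l, ((l.foldl (fun vx ch =>
        let lt := PySem.Str.len ch
        if vx.contains lt = false then
          vx.insert lt ((PySem.Dict.empty).insert ch 0)
        else
          if (vx.getD lt PySem.Dict.empty).contains ch = false then
            vx.modify lt PySem.Dict.empty (fun d => d.insert ch ((d.size : Int)))
          else vx) vx).getD (PySem.Str.len s) PySem.Dict.empty).contains s = true) := by
  induction l with
  | nil => intro vx; exact ⟨fun lt s h => h, by simp⟩
  | cons x l ih =>
    intro vx
    set step := (fun (vx : PySem.Dict Int (PySem.Dict String Int)) (ch : String) =>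
      let lt := PySem.Str.len ch
      if vx.contains lt = false then
        vx.insert lt ((PySem.Dict.empty).insert ch 0)
      else
        if (vx.getD lt PySem.Dict.empty).contains ch = false then
          vx.modify lt PySem.Dict.empty (fun d => d.insert ch ((d.size : Int)))
        else vx) with hstep
    have hmono : ∀ lt s, (vx.getD lt PySem.Dict.empty).contains s = true →
        ((step vx x).getD lt PySem.Dict.empty).contains s = true := by
      intro lt s hs
      rw [hstep]; simp only
      by_cases hc : vx.contains (PySem.Str.len x) = true
      · rw [if_neg (by rw [hc]; simp)]
        by_cases hch : (vx.getD (PySem.Str.len x) PySem.Dict.empty).contains x = true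
        · rw [if_neg (by rw [hch]; simp)]; exact hs
        · simp only [Bool.not_eq_true] at hch
          rw [if_pos hch]
          by_cases hlt : lt = PySem.Str.len x
          · rw [hlt, PySem.Dict.getD_modify_self]
            rw [hlt] at hs
            rw [PySem.Dict.contains_insert, hs]
            simp
          · rw [PySem.Dict.getD_modify_of_ne _ _ _ hlt]; exact hs
      · simp only [Bool.not_eq_true] at hc
        rw [if_pos hc]
        by_cases hlt : lt = PySem.Str.len x
        · rw [hlt] at hs
          rw [PySem.Dict.getD_of_not_contains _ _ hc] at hs
          rw [PySem.Dict.contains_empty] at hs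
          exact absurd hs (by simp)
        · rw [PySem.Dict.getD_insert_of_ne _ _ _ hlt]; exact hs
    have hself : ((step vx x).getD (PySem.Str.len x) PySem.Dict.empty).contains x = true := by
      rw [hstep]; simp only
      by_cases hc : vx.contains (PySem.Str.len x) = true
      · rw [if_neg (by rw [hc]; simp)]
        by_cases hch : (vx.getD (PySem.Str.len x) PySem.Dict.empty).contains x = true
        · rw [if_neg (by rw [hch]; simp)]; exact hch
        · simp only [Bool.not_eq_true] at hch
          rw [if_pos hch, PySem.Dict.getD_modify_self, PySem.Dict.contains_insert]
          simp
      · simp only [Bool.not_eq_true] at hc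
        rw [if_pos hc, PySem.Dict.getD_insert_self, PySem.Dict.contains_insert]
        simp
    refine ⟨?_, ?_⟩
    · intro lt s hs
      simp only [List.foldl_cons]
      exact (ih (step vx x)).1 lt s (hmono lt s hs)
    · intro s hs
      simp only [List.foldl_cons]
      rcases List.mem_cons.1 hs with hs | hs
      · subst hs
        exact (ih (step vx s)).1 _ s hself
      · exact (ih (step vx x)).2 s hs

theorem pv_vectex_mem (l : List String) :
    ∀ s ∈ l, ((pvVectexA l).getD (PySem.Str.len s) PySem.Dict.empty).contains s = true :=
  (pv_vectex_mem_aux l PySem.Dict.empty).2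

theorem pv_outer_contains (vx : PySem.Dict Int (PySem.Dict String Int)) (lt : Int) (s : String)
    (h : (vx.getD lt PySem.Dict.empty).contains s = true) : vx.contains lt = true := by
  by_contra hc
  simp only [Bool.not_eq_true] at hc
  rw [PySem.Dict.getD_of_not_contains _ _ hc, PySem.Dict.contains_empty] at h
  exact absurd h (by simp)

-- an id looked up in the dictionary is a legal index
theorem pv_id_bounds (d : PySem.Dict String Int)
    (hb : ∀ p ∈ d.items, 0 ≤ p.2 ∧ p.2 < ((d.size : Nat) : Int)) (s : String)
    (hc : d.contains s = true) : 0 ≤ d.getD s 0 ∧ d.getD s 0 < ((d.size : Nat) : Int) := by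
  rw [PySem.Dict.contains_eq_isSome_get?] at hc
  cases hq : d.get? s with
  | none => rw [hq] at hc; simp at hc
  | some v =>
    rw [PySem.Dict.getD_of_get?_eq_some _ _ hq]
    exact hb (s, v) (PySem.Dict.mem_items_of_get?_eq_some d hq)

-- correspondence between A's dense matrix and B's sparse id-pair dict (per length)
def pvMRelN (n : Int) (m : List (List (Option Int))) (bd : PySem.Dict (Int × Int) Int) : Prop :=
  m.length = n.toNat ∧ (∀ row ∈ m, row.length = n.toNat) ∧
  ∀ x y : Int, bd.get? (x, y) =
    if 0 ≤ x ∧ x < n ∧ 0 ≤ y ∧ y < n then PySem.List.pyGetD (PySem.List.pyGetD m x []) y none else none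

-- the no-op write: writing back the value just read leaves the matrix unchanged
theorem pv_setSame (m : List (List (Option Int))) (i j : Int) :
    PySem.List.pySetD m i (PySem.List.pySetD (PySem.List.pyGetD m i []) j
      (PySem.List.pyGetD (PySem.List.pyGetD m i []) j none)) = m := by
  simp only [PySem.List.pySetD, PySem.List.pySet?, PySem.List.pyGetD, PySem.List.pyGet?]
  cases hi : PySem.List.pyIdx? m.length i with
  | none => simp
  | some a =>
    have ha : a < m.length := by
      simp only [PySem.List.pyIdx?] at hi
      split_ifs at hi <;> simp_all <;> omega
    simp only [Option.bind_some, Option.map_some, Option.getD_some,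
      List.getElem?_eq_getElem ha, Option.getD_some]
    cases hj : PySem.List.pyIdx? (m[a].length) j with
    | none => simp [List.set_getElem_self]
    | some b =>
      have hb : b < m[a].length := by
        simp only [PySem.List.pyIdx?] at hj
        split_ifs at hj <;> simp_all <;> omega
      simp [List.getElem?_eq_getElem hb, List.set_getElem_self]

theorem pv_insert_getD_self {κ ν : Type} [BEq κ] [LawfulBEq κ] (d : PySem.Dict κ ν) (k : κ) (d0 : ν)
    (hnd : d.keys.Nodup) (h : d.contains k = true) : d.insert k (d.getD k d0) = d := by
  apply PySem.Dict.ext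
  rw [PySem.Dict.items_insert_of_contains _ _ h]
  conv_lhs => rw [List.map_congr_left (g := id) (fun p hp => by
    by_cases hpk : (p.1 == k) = true
    · simp only [hpk, if_true, id]
      have hk : p.1 = k := by simpa using hpk
      have hmem : (k, p.2) ∈ d.items := by rw [← hk]; exact hp
      have : d.get? k = some p.2 := (PySem.Dict.get?_eq_some_iff_mem_items d k p.2 hnd).2 hmem
      rw [PySem.Dict.getD_eq_get?_getD, this]
      simp [← hk]
    · simp [hpk])]
  simp

theorem pvMRelN_write (n : Int) (m : List (List (Option Int))) (bd : PySem.Dict (Int × Int) Int)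
    (h : pvMRelN n m bd) (x y : Int) (hx0 : 0 ≤ x) (hxn : x < n) (hy0 : 0 ≤ y) (hyn : y < n) (c : Int) :
    pvMRelN n (PySem.List.pySetD m x
        (PySem.List.pySetD (PySem.List.pyGetD m x []) y (some c)))
      (bd.insert (x, y) c) := by
  obtain ⟨hlen, hrows, hget⟩ := h
  obtain ⟨xn, rfl⟩ : ∃ k : Nat, x = (k : Int) := ⟨x.toNat, (Int.toNat_of_nonneg hx0).symm⟩
  obtain ⟨yn, rfl⟩ : ∃ k : Nat, y = (k : Int) := ⟨y.toNat, (Int.toNat_of_nonneg hy0).symm⟩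
  have hxm : xn < m.length := by omega
  have hrowlen : m[xn].length = n.toNat := hrows _ (List.getElem_mem hxm)
  have hrow : PySem.List.pyGetD m ((xn : Int)) [] = m[xn] := by
    rw [PySem.List.pyGetD_natCast]; exact List.getD_eq_getElem _ _ hxm
  rw [hrow, PySem.List.pySetD_natCast, PySem.List.pySetD_natCast]
  refine ⟨by simp [hlen], ?_, ?_⟩
  · intro row hmem
    rcases List.mem_or_eq_of_mem_set hmem with hmem | rfl
    · exact hrows row hmem
    · rw [List.length_set]; exact hrowlen
  · intro x' y'
    rw [PySem.Dict.get?_insert, hget x' y']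
    by_cases hb : 0 ≤ x' ∧ x' < n ∧ 0 ≤ y' ∧ y' < n
    · obtain ⟨x'n, rfl⟩ : ∃ k : Nat, x' = (k : Int) := ⟨x'.toNat, (Int.toNat_of_nonneg hb.1).symm⟩
      obtain ⟨y'n, rfl⟩ : ∃ k : Nat, y' = (k : Int) := ⟨y'.toNat, (Int.toNat_of_nonneg hb.2.2.1).symm⟩
      have hx'm : x'n < m.length := by omega
      have hsetlen : x'n < (m.set xn (m[xn].set yn (some c))).length := by
        rw [List.length_set]; exact hx'm
      have houter : PySem.List.pyGetD (m.set xn (m[xn].set yn (some c))) ((x'n : Int)) []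
          = if xn = x'n then m[xn].set yn (some c) else m[x'n] := by
        rw [PySem.List.pyGetD_natCast, List.getD_eq_getElem _ _ hsetlen, List.getElem_set]
      have hold : PySem.List.pyGetD m ((x'n : Int)) [] = m[x'n] := by
        rw [PySem.List.pyGetD_natCast]; exact List.getD_eq_getElem _ _ hx'm
      have hnew : PySem.List.pyGetD (PySem.List.pyGetD (m.set xn (m[xn].set yn (some c))) ((x'n : Int)) []) ((y'n : Int)) none
          = if xn = x'n ∧ yn = y'n then some c
            else PySem.List.pyGetD (PySem.List.pyGetD m ((x'n : Int)) []) ((y'n : Int)) none := by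
        rw [houter]
        by_cases hxx : xn = x'n
        · rw [if_pos hxx]
          subst hxx
          have hy'r : y'n < (m[xn].set yn (some c)).length := by
            rw [List.length_set]; omega
          rw [PySem.List.pyGetD_natCast, List.getD_eq_getElem _ _ hy'r, List.getElem_set]
          by_cases hyy : yn = y'n
          · rw [if_pos hyy, if_pos ⟨rfl, hyy⟩]
          · rw [if_neg hyy, if_neg (fun h => hyy h.2), hold]
            rw [PySem.List.pyGetD_natCast]
            exact (List.getD_eq_getElem _ _ (by omega : (y'n : Nat) < m[xn].length)).symm
        · rw [if_neg hxx, if_neg (fun h => hxx h.1), hold]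
      rw [if_pos hb, if_pos hb, hnew]
      by_cases hxy : xn = x'n ∧ yn = y'n
      · rw [if_pos hxy, if_pos (by rw [hxy.1, hxy.2])]
      · rw [if_neg hxy, if_neg (fun h => by
          rw [Prod.mk.injEq] at h
          exact hxy ⟨by exact_mod_cast h.1.symm, by exact_mod_cast h.2.symm⟩)]
    · have hne : ¬ ((x', y') = (((xn : Nat) : Int), ((yn : Nat) : Int))) := by
        rintro hp; rw [Prod.mk.injEq] at hp
        exact hb ⟨hp.1 ▸ (by positivity), hp.1 ▸ hxn, hp.2 ▸ (by positivity), hp.2 ▸ hyn⟩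
      rw [if_neg hb, if_neg hb, if_neg hne]

theorem pvDiagN_get?_aux (L : List Int) : ∀ (d : PySem.Dict (Int × Int) Int) (x y : Int),
    (L.foldl (fun d i => d.insert (i, i) 0) d).get? (x, y)
      = if x = y ∧ x ∈ L then some 0 else d.get? (x, y) := by
  induction L with
  | nil => intro d x y; simp
  | cons i L ih =>
    intro d x y
    rw [List.foldl_cons, ih, PySem.Dict.get?_insert]
    by_cases h1 : x = y
    · subst h1
      by_cases h2 : x ∈ L
      · simp [h2]
      · by_cases h3 : x = i
        · subst h3; simp [h2]
        · simp [h2, h3, Prod.ext_iff]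
    · have hne : ¬ ((x, y) = (i, i)) := by
        rintro h; rw [Prod.mk.injEq] at h; exact h1 (h.1.trans h.2.symm)
      simp [h1, hne]

theorem pvMRelN_diag (n : Int) (hn : 0 ≤ n) : pvMRelN n (pvMat n) (pvDiagN n) := by
  refine ⟨?_, ?_, ?_⟩
  · unfold pvMat
    rw [List.length_map, PySem.List.length_pyRange_one]
    omega
  · intro row hmem
    unfold pvMat at hmem
    obtain ⟨i, hi, rfl⟩ := List.mem_map.1 hmem
    rw [List.length_map, PySem.List.length_pyRange_one]
    omega
  · intro x y
    unfold pvDiagN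
    rw [pvDiagN_get?_aux]
    simp only [PySem.Dict.get?_empty]
    by_cases hb : 0 ≤ x ∧ x < n ∧ 0 ≤ y ∧ y < n
    · rw [if_pos hb]
      unfold pvMat
      rw [PySem.List.pyGetD_map_pyRange_of_nonneg _ _ _ _ hb.1 hb.2.1,
        PySem.List.pyGetD_map_pyRange_of_nonneg _ _ _ _ hb.2.2.1 hb.2.2.2]
      by_cases hxy : x = y
      · rw [if_pos ⟨hxy, PySem.List.mem_pyRange_one.2 ⟨hb.1, hb.2.1⟩⟩, if_pos (by simp [hxy])]
      · rw [if_neg (fun h => hxy h.1), if_neg (by simp [hxy])]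
    · rw [if_neg hb]
      by_cases hxy : x = y
      · subst hxy
        rw [if_neg (fun h => hb (by
          have := PySem.List.mem_pyRange_one.1 h.2
          exact ⟨this.1, this.2, this.1, this.2⟩))]
      · rw [if_neg (fun h => hxy h.1)]

-- phases 2–4 global invariant
def pvWInv (vx : PySem.Dict Int (PySem.Dict String Int))
    (w : PySem.Dict Int (List (List (Option Int)))) (dist : PySem.Dict Int (PySem.Dict (Int × Int) Int)) : Prop :=
  w.keys = vx.keys ∧ dist.keys = vx.keys ∧
  ∀ lt, pvMRelN (((vx.getD lt PySem.Dict.empty).size : Nat) : Int) (w.getD lt []) (dist.getD lt PySem.Dict.empty)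

theorem pv_winit_keys (vx : PySem.Dict Int (PySem.Dict String Int)) (h : vx.keys.Nodup) :
    (pvWInitA vx).keys = vx.keys := by
  unfold pvWInitA
  rw [PySem.Dict.keys_foldl_insert]
  simp [PySem.Set.update_nil_left, PySem.Set.ofList_eq_self_of_nodup _ h]

theorem pv_distinit_keys (vx : PySem.Dict Int (PySem.Dict String Int)) (h : vx.keys.Nodup) :
    (pvDistInitB vx).keys = vx.keys := by
  unfold pvDistInitB
  rw [PySem.Dict.keys_foldl_insert_key]
  simp only [PySem.Dict.keys_empty, PySem.Set.update_nil_left]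
  exact PySem.Set.ofList_eq_self_of_nodup _ h

theorem pv_winv0 (vx : PySem.Dict Int (PySem.Dict String Int)) (hnd : vx.keys.Nodup) :
    pvWInv vx (pvWInitA vx) (pvDistInitB vx) := by
  have hwkeys := pv_winit_keys vx hnd
  have hdkeys := pv_distinit_keys vx hnd
  refine ⟨hwkeys, hdkeys, ?_⟩
  intro lt
  by_cases hin : lt ∈ vx.keys
  · have hWitems : (pvWInitA vx).items
        = vx.keys.map (fun k => (k, pvMat ((vx.getD k PySem.Dict.empty).size : Int))) := by
      unfold pvWInitA
      have := PySem.Dict.items_foldl_insert_fresh vx.keys (fun k => k)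
        (fun k => pvMat ((vx.getD k PySem.Dict.empty).size : Int)) PySem.Dict.empty
        (fun a _ => PySem.Dict.contains_empty a) (by simpa using hnd)
      simpa using this
    have hWgetD : (pvWInitA vx).getD lt [] = pvMat ((vx.getD lt PySem.Dict.empty).size : Int) :=
      PySem.Dict.getD_of_mem_items _ (by rw [hWitems]; exact List.mem_map_of_mem hin)
        (by rw [hwkeys]; exact hnd) []
    have hDitems : (pvDistInitB vx).items = vx.items.map (fun p => (p.1, pvDiagN ((p.2.size : Int)))) := by
      unfold pvDistInitB
      have := PySem.Dict.items_foldl_insert_fresh vx.items (fun p => p.1)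
        (fun p => pvDiagN ((p.2.size : Int))) PySem.Dict.empty
        (fun a _ => PySem.Dict.contains_empty a.1) hnd
      simpa using this
    have hvmem : (lt, vx.getD lt PySem.Dict.empty) ∈ vx.items := by
      rw [PySem.Dict.items_eq_map_keys vx hnd PySem.Dict.empty]
      exact List.mem_map_of_mem hin
    have hDgetD : (pvDistInitB vx).getD lt PySem.Dict.empty
        = pvDiagN (((vx.getD lt PySem.Dict.empty).size : Int)) :=
      PySem.Dict.getD_of_mem_items _
        (by rw [hDitems]
            exact (List.mem_map_of_mem (f := fun p => (p.1, pvDiagN ((p.2.size : Int)))) hvmem))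
        (by rw [hdkeys]; exact hnd) PySem.Dict.empty
    rw [hWgetD, hDgetD]
    exact pvMRelN_diag _ (by positivity)
  · have hvc : vx.contains lt = false := by
      rw [PySem.Dict.contains_eq_decide_mem_keys]; simp [hin]
    have hwc : (pvWInitA vx).contains lt = false := by
      rw [PySem.Dict.contains_eq_decide_mem_keys, hwkeys]; simp [hin]
    have hdc : (pvDistInitB vx).contains lt = false := by
      rw [PySem.Dict.contains_eq_decide_mem_keys, hdkeys]; simp [hin]
    rw [PySem.Dict.getD_of_not_contains _ _ hvc, PySem.Dict.getD_of_not_contains _ _ hwc,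
      PySem.Dict.getD_of_not_contains _ _ hdc]
    refine ⟨by simp [PySem.Dict.size_empty], by simp, fun x y => by
      rw [PySem.Dict.get?_empty, if_neg (by
        rintro ⟨h1, h2, h3, h4⟩
        simp [PySem.Dict.size_empty] at h2
        omega)]⟩

theorem pv_edges_winv (vx : PySem.Dict Int (PySem.Dict String Int))
    (E : List (String × String × Int)) (w : PySem.Dict Int (List (List (Option Int))))
    (dist : PySem.Dict Int (PySem.Dict (Int × Int) Int))
    (hI : pvIOK vx) (hW : pvWInv vx w dist)
    (hE : ∀ t ∈ E, (vx.getD (PySem.Str.len t.1) PySem.Dict.empty).contains t.1 = true ∧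
      (vx.getD (PySem.Str.len t.1) PySem.Dict.empty).contains t.2.1 = true) :
    pvWInv vx (pvEdgesA vx E w) (pvEdgesB vx E dist) := by
  obtain ⟨hnd, hin⟩ := hI
  unfold pvEdgesA pvEdgesB
  refine pvFoldRelMem (pvWInv vx) E _ _ ?_ _ _ hW
  intro t ht w dist hR
  obtain ⟨hwkeys, hdkeys, hmrel⟩ := hR
  obtain ⟨hcu, hcv⟩ := hE t ht
  simp only
  have hvc : vx.contains (PySem.Str.len t.1) = true := pv_outer_contains vx _ t.1 hcu
  have hwc : w.contains (PySem.Str.len t.1) = true := by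
    rw [PySem.Dict.contains_eq_decide_mem_keys, hwkeys,
      ← PySem.Dict.contains_eq_decide_mem_keys]
    exact hvc
  have hdc : dist.contains (PySem.Str.len t.1) = true := by
    rw [PySem.Dict.contains_eq_decide_mem_keys, hdkeys,
      ← PySem.Dict.contains_eq_decide_mem_keys]
    exact hvc
  have hbu := pv_id_bounds _ (hin (PySem.Str.len t.1)).2 t.1 hcu
  have hbv := pv_id_bounds _ (hin (PySem.Str.len t.1)).2 t.2.1 hcv
  have hm := hmrel (PySem.Str.len t.1)
  have hread : (dist.getD (PySem.Str.len t.1) PySem.Dict.empty).get?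
        ((vx.getD (PySem.Str.len t.1) PySem.Dict.empty).getD t.1 0,
         (vx.getD (PySem.Str.len t.1) PySem.Dict.empty).getD t.2.1 0)
      = PySem.List.pyGetD (PySem.List.pyGetD (w.getD (PySem.Str.len t.1) [])
          ((vx.getD (PySem.Str.len t.1) PySem.Dict.empty).getD t.1 0) [])
        ((vx.getD (PySem.Str.len t.1) PySem.Dict.empty).getD t.2.1 0) none := by
    rw [hm.2.2, if_pos ⟨hbu.1, hbu.2, hbv.1, hbv.2⟩]
  have hcond : pvELt (some t.2.2)
      (PySem.List.pyGetD (PySem.List.pyGetD (w.getD (PySem.Str.len t.1) [])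
          ((vx.getD (PySem.Str.len t.1) PySem.Dict.empty).getD t.1 0) [])
        ((vx.getD (PySem.Str.len t.1) PySem.Dict.empty).getD t.2.1 0) none)
      = (!((dist.getD (PySem.Str.len t.1) PySem.Dict.empty).contains
            ((vx.getD (PySem.Str.len t.1) PySem.Dict.empty).getD t.1 0,
             (vx.getD (PySem.Str.len t.1) PySem.Dict.empty).getD t.2.1 0))
          || decide (t.2.2 < (dist.getD (PySem.Str.len t.1) PySem.Dict.empty).getD
            ((vx.getD (PySem.Str.len t.1) PySem.Dict.empty).getD t.1 0,
             (vx.getD (PySem.Str.len t.1) PySem.Dict.empty).getD t.2.1 0) 0)) := by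
    rw [← hread, PySem.Dict.contains_eq_isSome_get?,
      PySem.Dict.getD_eq_get?_getD (d := dist.getD (PySem.Str.len t.1) PySem.Dict.empty)]
    cases hq : (dist.getD (PySem.Str.len t.1) PySem.Dict.empty).get?
        ((vx.getD (PySem.Str.len t.1) PySem.Dict.empty).getD t.1 0,
         (vx.getD (PySem.Str.len t.1) PySem.Dict.empty).getD t.2.1 0) <;> rfl
  by_cases hc : (!((dist.getD (PySem.Str.len t.1) PySem.Dict.empty).contains
        ((vx.getD (PySem.Str.len t.1) PySem.Dict.empty).getD t.1 0,
         (vx.getD (PySem.Str.len t.1) PySem.Dict.empty).getD t.2.1 0))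
      || decide (t.2.2 < (dist.getD (PySem.Str.len t.1) PySem.Dict.empty).getD
        ((vx.getD (PySem.Str.len t.1) PySem.Dict.empty).getD t.1 0,
         (vx.getD (PySem.Str.len t.1) PySem.Dict.empty).getD t.2.1 0) 0)) = true
  · rw [if_pos (by rw [hcond]; exact hc), if_pos hc]
    refine ⟨by rw [PySem.Dict.keys_insert_of_contains _ _ hwc]; exact hwkeys,
            by rw [PySem.Dict.keys_insert_of_contains _ _ hdc]; exact hdkeys, ?_⟩
    intro lt'
    by_cases hlt' : lt' = PySem.Str.len t.1
    · rw [hlt', PySem.Dict.getD_insert_self, PySem.Dict.getD_insert_self]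
      exact pvMRelN_write _ _ _ hm _ _ hbu.1 hbu.2 hbv.1 hbv.2 _
    · rw [PySem.Dict.getD_insert_of_ne _ _ _ hlt', PySem.Dict.getD_insert_of_ne _ _ _ hlt']
      exact hmrel lt'
  · rw [if_neg (by rw [hcond]; exact hc), if_neg hc]
    exact ⟨hwkeys, hdkeys, hmrel⟩

theorem pv_floyd_inner (vx : PySem.Dict Int (PySem.Dict String Int)) (hnd : vx.keys.Nodup)
    (lt : Int) (hltk : lt ∈ vx.keys) (k i j : Int)
    (hk0 : 0 ≤ k) (hkn : k < ((vx.getD lt PySem.Dict.empty).size : Int))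
    (hi0 : 0 ≤ i) (hin : i < ((vx.getD lt PySem.Dict.empty).size : Int))
    (hj0 : 0 ≤ j) (hjn : j < ((vx.getD lt PySem.Dict.empty).size : Int))
    (w : PySem.Dict Int (List (List (Option Int)))) (dist : PySem.Dict Int (PySem.Dict (Int × Int) Int))
    (hR : pvWInv vx w dist) :
    pvWInv vx
      (w.insert lt (PySem.List.pySetD (w.getD lt []) i
        (PySem.List.pySetD (PySem.List.pyGetD (w.getD lt []) i []) j
          (pvEMin
            (PySem.List.pyGetD (PySem.List.pyGetD (w.getD lt []) i []) j none)
            (pvEAdd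
              (PySem.List.pyGetD (PySem.List.pyGetD (w.getD lt []) i []) k none)
              (PySem.List.pyGetD (PySem.List.pyGetD (w.getD lt []) k []) j none))))))
      (match (dist.getD lt PySem.Dict.empty).get? (i, k), (dist.getD lt PySem.Dict.empty).get? (k, j) with
       | some a, some b =>
         if !((dist.getD lt PySem.Dict.empty).contains (i, j))
             || decide (a + b < (dist.getD lt PySem.Dict.empty).getD (i, j) 0) then
           dist.insert lt ((dist.getD lt PySem.Dict.empty).insert (i, j) (a + b))
         else dist
       | _, _ => dist) := by
  obtain ⟨hwkeys, hdkeys, hmrel⟩ := hR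
  have hm := hmrel lt
  have hik : (dist.getD lt PySem.Dict.empty).get? (i, k)
      = PySem.List.pyGetD (PySem.List.pyGetD (w.getD lt []) i []) k none := by
    rw [hm.2.2, if_pos ⟨hi0, hin, hk0, hkn⟩]
  have hkj : (dist.getD lt PySem.Dict.empty).get? (k, j)
      = PySem.List.pyGetD (PySem.List.pyGetD (w.getD lt []) k []) j none := by
    rw [hm.2.2, if_pos ⟨hk0, hkn, hj0, hjn⟩]
  have hij : (dist.getD lt PySem.Dict.empty).get? (i, j)
      = PySem.List.pyGetD (PySem.List.pyGetD (w.getD lt []) i []) j none := by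
    rw [hm.2.2, if_pos ⟨hi0, hin, hj0, hjn⟩]
  have hwc : w.contains lt = true := by
    rw [PySem.Dict.contains_eq_decide_mem_keys, hwkeys]; simp [hltk]
  have hdc : dist.contains lt = true := by
    rw [PySem.Dict.contains_eq_decide_mem_keys, hdkeys]; simp [hltk]
  have hwnd : w.keys.Nodup := by rw [hwkeys]; exact hnd
  cases hA : (dist.getD lt PySem.Dict.empty).get? (i, k) with
  | none =>
    have h1 : PySem.List.pyGetD (PySem.List.pyGetD (w.getD lt []) i []) k none = none := by
      rw [← hik, hA]
    rw [h1]
    have hnoop : ∀ cur : Option Int, pvEMin cur (pvEAdd none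
        (PySem.List.pyGetD (PySem.List.pyGetD (w.getD lt []) k []) j none)) = cur := by
      intro cur; rfl
    rw [hnoop, pv_setSame, pv_insert_getD_self _ _ _ hwnd hwc]
    exact ⟨hwkeys, hdkeys, hmrel⟩
  | some a =>
    cases hB : (dist.getD lt PySem.Dict.empty).get? (k, j) with
    | none =>
      have h2 : PySem.List.pyGetD (PySem.List.pyGetD (w.getD lt []) k []) j none = none := by
        rw [← hkj, hB]
      rw [h2]
      have hnoop : ∀ x cur : Option Int, pvEMin cur (pvEAdd x none) = cur := by
        intro x cur
        cases x <;> rfl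
      rw [hnoop, pv_setSame, pv_insert_getD_self _ _ _ hwnd hwc]
      exact ⟨hwkeys, hdkeys, hmrel⟩
    | some b =>
      have h1 : PySem.List.pyGetD (PySem.List.pyGetD (w.getD lt []) i []) k none = some a := by
        rw [← hik, hA]
      have h2 : PySem.List.pyGetD (PySem.List.pyGetD (w.getD lt []) k []) j none = some b := by
        rw [← hkj, hB]
      rw [h1, h2]
      have hadd : pvEAdd (some a) (some b) = some (a + b) := rfl
      rw [hadd]
      dsimp only
      by_cases hc : (!((dist.getD lt PySem.Dict.empty).contains (i, j))
          || decide (a + b < (dist.getD lt PySem.Dict.empty).getD (i, j) 0)) = true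
      · have hlt' : pvELt (some (a + b)) ((dist.getD lt PySem.Dict.empty).get? (i, j)) = true := by
          rw [PySem.Dict.contains_eq_isSome_get?,
            PySem.Dict.getD_eq_get?_getD (d := dist.getD lt PySem.Dict.empty)] at hc
          cases hq : (dist.getD lt PySem.Dict.empty).get? (i, j) with
          | none => rfl
          | some cur => rw [hq] at hc; simpa [pvELt] using hc
        have hwrite : pvEMin
            (PySem.List.pyGetD (PySem.List.pyGetD (w.getD lt []) i []) j none)
            (some (a + b)) = some (a + b) := by
          rw [pvEMin, ← hij, hlt', if_pos rfl]
        rw [hwrite, if_pos hc]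
        refine ⟨by rw [PySem.Dict.keys_insert_of_contains _ _ hwc]; exact hwkeys,
                by rw [PySem.Dict.keys_insert_of_contains _ _ hdc]; exact hdkeys, ?_⟩
        intro lt'
        by_cases hlt'' : lt' = lt
        · rw [hlt'', PySem.Dict.getD_insert_self, PySem.Dict.getD_insert_self]
          exact pvMRelN_write _ _ _ hm _ _ hi0 hin hj0 hjn _
        · rw [PySem.Dict.getD_insert_of_ne _ _ _ hlt'', PySem.Dict.getD_insert_of_ne _ _ _ hlt'']
          exact hmrel lt'
      · have hlt' : pvELt (some (a + b)) ((dist.getD lt PySem.Dict.empty).get? (i, j)) = false := by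
          rw [PySem.Dict.contains_eq_isSome_get?,
            PySem.Dict.getD_eq_get?_getD (d := dist.getD lt PySem.Dict.empty)] at hc
          cases hq : (dist.getD lt PySem.Dict.empty).get? (i, j) with
          | none => rw [hq] at hc; simp at hc
          | some cur =>
            rw [hq] at hc
            simp only [pvELt, decide_eq_false_iff_not]
            intro hab
            exact hc (by simp [hab])
        have hnoop : pvEMin
            (PySem.List.pyGetD (PySem.List.pyGetD (w.getD lt []) i []) j none)
            (some (a + b))
            = PySem.List.pyGetD (PySem.List.pyGetD (w.getD lt []) i []) j none := by
          rw [pvEMin, ← hij, hlt']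
          simp
        rw [hnoop, pv_setSame, pv_insert_getD_self _ _ _ hwnd hwc, if_neg hc]
        exact ⟨hwkeys, hdkeys, hmrel⟩

theorem pv_floyd_winv (vx : PySem.Dict Int (PySem.Dict String Int))
    (w : PySem.Dict Int (List (List (Option Int)))) (dist : PySem.Dict Int (PySem.Dict (Int × Int) Int))
    (hnd : vx.keys.Nodup) (hW : pvWInv vx w dist) :
    pvWInv vx (pvFloydA vx w) (pvFloydB vx dist) := by
  unfold pvFloydA pvFloydB
  have hdnd : dist.keys.Nodup := by rw [hW.2.1]; exact hnd
  rw [PySem.Dict.items_eq_map_keys dist hdnd PySem.Dict.empty, List.foldl_map, hW.2.1]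
  refine pvFoldRelMem (pvWInv vx) vx.keys _ _ ?_ _ _ hW
  intro lt hltk w0 dist0 hR0
  simp only
  refine pvFoldRelMem (pvWInv vx) _ _ _ ?_ _ _ hR0
  intro k hkmem w1 dist1 hR1
  refine pvFoldRelMem (pvWInv vx) _ _ _ ?_ _ _ hR1
  intro i himem w2 dist2 hR2
  refine pvFoldRelMem (pvWInv vx) _ _ _ ?_ _ _ hR2
  intro j hjmem w3 dist3 hR3
  have hk := PySem.List.mem_pyRange_one.1 hkmem
  have hi := PySem.List.mem_pyRange_one.1 himem
  have hj := PySem.List.mem_pyRange_one.1 hjmem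
  exact pv_floyd_inner vx hnd lt hltk k i j hk.1 hk.2 hi.1 hi.2 hj.1 hj.2 w3 dist3 hR3

-- the dp array after the first M iterations of B's loop
def pvDpAt (source target : String) (vx : PySem.Dict Int (PySem.Dict String Int))
    (w : PySem.Dict Int (List (List (Option Int)))) (n M : Nat) : List (Option Int) :=
  (List.range (n+1)).map (fun j => if j ≤ M then pvDfsA source target vx w j else none)

theorem pv_dpAt_zero (source target : String) (vx : PySem.Dict Int (PySem.Dict String Int))
    (w : PySem.Dict Int (List (List (Option Int)))) (n : Nat) :
    (some 0 :: List.replicate n none) = pvDpAt source target vx w n 0 := by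
  apply List.ext_getElem
  · simp [pvDpAt]
  · intro k h1 h2
    unfold pvDpAt
    match k with
    | 0 => simp [pvDfsA]
    | (k+1) =>
      simp

theorem pv_dpAt_read (source target : String) (vx : PySem.Dict Int (PySem.Dict String Int))
    (w : PySem.Dict Int (List (List (Option Int)))) (n M : Nat) (i : Int) (h0 : 0 ≤ i) :
    PySem.List.pyGetD (pvDpAt source target vx w n M) i none
      = if i ≤ (n : Int) ∧ i.toNat ≤ M then pvDfsA source target vx w i.toNat else none := by
  obtain ⟨k, rfl⟩ : ∃ k : Nat, i = (k:Int) := ⟨i.toNat, (Int.toNat_of_nonneg h0).symm⟩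
  unfold pvDpAt
  rw [PySem.List.pyGetD_natCast]
  by_cases hk : k < n+1
  · rw [PySem.List.getD_map_range _ _ _ _ hk]
    have hkn : ((k:Int) ≤ (n:Int)) := by exact_mod_cast Nat.lt_succ_iff.1 hk
    simp only [Int.toNat_natCast, hkn, true_and]
  · have hlen : ((List.range (n+1)).map (fun j => if j ≤ M then pvDfsA source target vx w j else none)).length ≤ k := by
      simp; omega
    rw [List.getD_eq_default _ _ hlen]
    have : ¬ ((k:Int) ≤ (n:Int)) := by exact_mod_cast fun (h : k ≤ n) => hk (by omega)
    simp only [this, false_and, if_false]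

theorem pv_dpAt_set (source target : String) (vx : PySem.Dict Int (PySem.Dict String Int))
    (w : PySem.Dict Int (List (List (Option Int)))) (n M : Nat) :
    PySem.List.pySetD (pvDpAt source target vx w n M) ((M:Int)+1)
        (pvDfsA source target vx w (M+1)) = pvDpAt source target vx w n (M+1) := by
  have : ((M:Int)+1) = ((M+1 : Nat) : Int) := by push_cast; ring
  rw [this, PySem.List.pySetD_natCast]
  apply List.ext_getElem
  · simp [pvDpAt]
  · intro k h1 h2
    unfold pvDpAt at *
    simp only [List.length_set, List.length_map, List.length_range] at h1 h2
    rw [List.getElem_set]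
    by_cases hk : M + 1 = k
    · subst hk
      simp
    · simp only [hk, if_false, List.getElem_map, List.getElem_range]
      by_cases h : k ≤ M
      · simp [h, Nat.le_succ_of_le h]
      · simp [h, show ¬ k ≤ M + 1 by omega]

theorem pv_dp_step (source target : String) (vx : PySem.Dict Int (PySem.Dict String Int))
    (w : PySem.Dict Int (List (List (Option Int)))) (dist : PySem.Dict Int (PySem.Dict (Int × Int) Int))
    (hI : pvIOK vx) (hW : pvWInv vx w dist) (n M : Nat) (hM : M < n) :
    (vx.items.foldl (fun best p =>
      let su := PySem.Str.slice source (some (((M:Int)+1) - p.1)) (some ((M:Int)+1))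
      let tv := PySem.Str.slice target (some (((M:Int)+1) - p.1)) (some ((M:Int)+1))
      if decide (p.1 ≤ ((M:Int)+1)) && p.2.contains su && p.2.contains tv then
        match (dist.getD p.1 PySem.Dict.empty).get? (p.2.getD su 0, p.2.getD tv 0) with
        | some c =>
          match PySem.List.pyGetD (pvDpAt source target vx w n M) (((M:Int)+1) - p.1) none with
          | some prev =>
            let cand := c + prev
            if best == none || decide (cand < best.getD 0) then some cand else best
          | none => best
        | none => best
      else best)
      (if PySem.List.pyGet? source.toList (((M:Int)+1) - 1) == PySem.List.pyGet? target.toList (((M:Int)+1) - 1) then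
        PySem.List.pyGetD (pvDpAt source target vx w n M) (((M:Int)+1) - 1) none
      else none))
    = pvDfsA source target vx w (M+1) := by
  obtain ⟨hnd, hiok⟩ := hI
  obtain ⟨hwkeys, hdkeys, hmrel⟩ := hW
  have hres0 : (if PySem.List.pyGet? source.toList (((M:Int)+1) - 1) == PySem.List.pyGet? target.toList (((M:Int)+1) - 1) then
        PySem.List.pyGetD (pvDpAt source target vx w n M) (((M:Int)+1) - 1) none
      else none)
      = (if source.toList[M]? == target.toList[M]? then pvDfsA source target vx w M else none) := by
    have h1 : ((M:Int)+1) - 1 = ((M:Nat) : Int) := by ring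
    rw [h1, PySem.List.pyGet?_natCast, PySem.List.pyGet?_natCast,
      pv_dpAt_read source target vx w n M _ (by positivity),
      if_pos (⟨by exact_mod_cast hM.le, by simp⟩ : ((M:Int) ≤ (n:Int) ∧ ((M:Int)).toNat ≤ M))]
    simp only [Int.toNat_natCast]
  have hA : pvDfsA source target vx w (M+1)
      = (vx.keys.filter (fun lt => decide (1 ≤ lt) && !decide (lt > ((M:Int) + 1)))).foldl
        (fun res lt =>
          let d := vx.getD lt PySem.Dict.empty
          let su := PySem.Str.slice source (some (((M:Int) + 1) - lt)) (some ((M:Int) + 1))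
          let tv := PySem.Str.slice target (some (((M:Int) + 1) - lt)) (some ((M:Int) + 1))
          if d.contains su && d.contains tv then
            pvEMin res (pvEAdd
              (PySem.List.pyGetD (PySem.List.pyGetD (w.getD lt []) (d.getD su 0) []) (d.getD tv 0) none)
              (pvDfsA source target vx w (M + 1 - lt.toNat)))
          else res)
        (if source.toList[M]? == target.toList[M]? then pvDfsA source target vx w M else none) := by
    conv_lhs => rw [pvDfsA]
    exact List.foldl_attach (f := fun res lt =>
          let d := vx.getD lt PySem.Dict.empty
          let su := PySem.Str.slice source (some (((M:Int) + 1) - lt)) (some ((M:Int) + 1))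
          let tv := PySem.Str.slice target (some (((M:Int) + 1) - lt)) (some ((M:Int) + 1))
          if d.contains su && d.contains tv then
            pvEMin res (pvEAdd
              (PySem.List.pyGetD (PySem.List.pyGetD (w.getD lt []) (d.getD su 0) []) (d.getD tv 0) none)
              (pvDfsA source target vx w (M + 1 - lt.toNat)))
          else res)
  rw [hA, ← PySem.List.foldl_if_eq_foldl_filter]
  rw [PySem.Dict.items_eq_map_keys vx hnd PySem.Dict.empty, List.foldl_map]
  rw [hres0]
  apply PySem.List.foldl_congr_mem
  intro acc lt hlt
  simp only
  by_cases h2 : lt ≤ (M:Int) + 1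
  · by_cases h1 : (1:Int) ≤ lt
    · have hg1 : (decide (1 ≤ lt) && !decide (lt > ((M:Int) + 1))) = true := by
        simp only [Bool.and_eq_true, decide_eq_true_eq, Bool.not_eq_true', decide_eq_false_iff_not]
        exact ⟨h1, by omega⟩
      have hg2 : decide (lt ≤ ((M:Int)+1)) = true := by simp [h2]
      rw [hg1, hg2, if_pos rfl]
      have hdp : PySem.List.pyGetD (pvDpAt source target vx w n M) (((M:Int)+1) - lt) none
          = pvDfsA source target vx w (M + 1 - lt.toNat) := by
        rw [pv_dpAt_read source target vx w n M _ (by omega),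
          if_pos (show ((M:Int)+1) - lt ≤ (n:Int) ∧ (((M:Int)+1) - lt).toNat ≤ M by
            constructor <;> omega)]
        congr 1
        omega
      by_cases hcsu : (vx.getD lt PySem.Dict.empty).contains
          (PySem.Str.slice source (some (((M:Int)+1) - lt)) (some ((M:Int)+1))) = true
      · by_cases hctv : (vx.getD lt PySem.Dict.empty).contains
            (PySem.Str.slice target (some (((M:Int)+1) - lt)) (some ((M:Int)+1))) = true
        · have hbsu := pv_id_bounds _ (hiok lt).2 _ hcsu
          have hbtv := pv_id_bounds _ (hiok lt).2 _ hctv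
          have hread : (dist.getD lt PySem.Dict.empty).get?
              ((vx.getD lt PySem.Dict.empty).getD
                 (PySem.Str.slice source (some (((M:Int)+1) - lt)) (some ((M:Int)+1))) 0,
               (vx.getD lt PySem.Dict.empty).getD
                 (PySem.Str.slice target (some (((M:Int)+1) - lt)) (some ((M:Int)+1))) 0)
              = PySem.List.pyGetD (PySem.List.pyGetD (w.getD lt [])
                  ((vx.getD lt PySem.Dict.empty).getD
                    (PySem.Str.slice source (some (((M:Int)+1) - lt)) (some ((M:Int)+1))) 0) [])
                  ((vx.getD lt PySem.Dict.empty).getD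
                    (PySem.Str.slice target (some (((M:Int)+1) - lt)) (some ((M:Int)+1))) 0) none := by
            rw [(hmrel lt).2.2, if_pos ⟨hbsu.1, hbsu.2, hbtv.1, hbtv.2⟩]
          rw [hcsu, hctv, if_pos (show (true && true) = true from rfl),
            if_pos (show (true && true && true) = true from rfl), ← hread, hdp]
          cases hq : (dist.getD lt PySem.Dict.empty).get?
              ((vx.getD lt PySem.Dict.empty).getD
                 (PySem.Str.slice source (some (((M:Int)+1) - lt)) (some ((M:Int)+1))) 0,
               (vx.getD lt PySem.Dict.empty).getD
                 (PySem.Str.slice target (some (((M:Int)+1) - lt)) (some ((M:Int)+1))) 0) with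
          | none => rfl
          | some c =>
            cases hdfs : pvDfsA source target vx w (M + 1 - lt.toNat) with
            | none => rfl
            | some prev => cases acc <;> rfl
        · simp only [Bool.not_eq_true] at hctv
          rw [hcsu, hctv]
          simp
      · simp only [Bool.not_eq_true] at hcsu
        rw [hcsu]
        simp
    · have hg1 : (decide (1 ≤ lt) && !decide (lt > ((M:Int) + 1))) = false := by
        simp only [Bool.and_eq_false_iff, decide_eq_false_iff_not]
        left; exact h1
      rw [hg1, if_neg (show ¬((false : Bool) = true) by simp)]
      by_cases hg : (decide (lt ≤ ((M:Int)+1))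
          && (vx.getD lt PySem.Dict.empty).contains
              (PySem.Str.slice source (some (((M:Int)+1) - lt)) (some ((M:Int)+1)))
          && (vx.getD lt PySem.Dict.empty).contains
              (PySem.Str.slice target (some (((M:Int)+1) - lt)) (some ((M:Int)+1)))) = true
      · rw [if_pos hg]
        have hdp : PySem.List.pyGetD (pvDpAt source target vx w n M) (((M:Int)+1) - lt) none = none := by
          rw [pv_dpAt_read source target vx w n M _ (by omega),
            if_neg (by intro h; omega)]
        cases hq : (dist.getD lt PySem.Dict.empty).get?
            ((vx.getD lt PySem.Dict.empty).getD
               (PySem.Str.slice source (some (((M:Int)+1) - lt)) (some ((M:Int)+1))) 0,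
             (vx.getD lt PySem.Dict.empty).getD
               (PySem.Str.slice target (some (((M:Int)+1) - lt)) (some ((M:Int)+1))) 0) with
        | none => rfl
        | some c => rw [hdp]
      · rw [if_neg (by simpa using hg)]
  · have hg1 : (decide (1 ≤ lt) && !decide (lt > ((M:Int) + 1))) = false := by
      simp only [Bool.and_eq_false_iff, Bool.not_eq_false', decide_eq_true_eq]
      right; omega
    have hg2 : decide (lt ≤ ((M:Int)+1)) = false := by simp [h2]
    rw [hg1, hg2, if_neg (by simp), if_neg (by simp)]

theorem pv_dp_eq (source target : String) (vx : PySem.Dict Int (PySem.Dict String Int))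
    (w : PySem.Dict Int (List (List (Option Int)))) (dist : PySem.Dict Int (PySem.Dict (Int × Int) Int))
    (hI : pvIOK vx) (hW : pvWInv vx w dist) :
    pvDpB source target vx dist
      = (List.range (source.toList.length + 1)).map (fun j => pvDfsA source target vx w j) := by
  unfold pvDpB
  simp only [PySem.Str.len, Int.toNat_natCast]
  have key : ∀ M, M ≤ source.toList.length →
      (PySem.List.pyRange 1 ((M:Int) + 1) 1).foldl (fun dp i =>
        let best : Option Int :=
          if PySem.List.pyGet? source.toList (i - 1) == PySem.List.pyGet? target.toList (i - 1) then
            PySem.List.pyGetD dp (i - 1) none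
          else none
        let best := vx.items.foldl (fun best p =>
          let su := PySem.Str.slice source (some (i - p.1)) (some i)
          let tv := PySem.Str.slice target (some (i - p.1)) (some i)
          if decide (p.1 ≤ i) && p.2.contains su && p.2.contains tv then
            match (dist.getD p.1 PySem.Dict.empty).get? (p.2.getD su 0, p.2.getD tv 0) with
            | some c =>
              match PySem.List.pyGetD dp (i - p.1) none with
              | some prev =>
                let cand := c + prev
                if best == none || decide (cand < best.getD 0) then some cand else best
              | none => best
            | none => best
          else best) best
        PySem.List.pySetD dp i best) (some 0 :: List.replicate source.toList.length none)
      = pvDpAt source target vx w source.toList.length M := by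
    intro M
    induction M with
    | zero =>
      intro _
      rw [PySem.List.pyRange_one_eq_nil (by norm_num)]
      exact pv_dpAt_zero source target vx w source.toList.length
    | succ M ih =>
      intro hM1
      have hM : M < source.toList.length := by omega
      have hcast : ((M+1 : Nat) : Int) + 1 = ((M:Int) + 1) + 1 := by push_cast; ring
      rw [hcast, PySem.List.pyRange_one_succ_right (by omega), List.foldl_append,
        ih (by omega)]
      simp only [List.foldl_cons, List.foldl_nil]
      rw [pv_dp_step source target vx w dist ⟨hI.1, hI.2⟩ ⟨hW.1, hW.2.1, hW.2.2⟩
        source.toList.length M hM]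
      exact pv_dpAt_set source target vx w source.toList.length M
  rw [key source.toList.length (le_refl _)]
  unfold pvDpAt
  apply List.map_congr_left
  intro j hj
  rw [if_pos (by simp only [List.mem_range] at hj; omega)]

-- ===== VERDICT (by name: the statement is the Claim_ definition above) =====
theorem minimumCost2_spec : Claim_equal_minimumCost2 := by
  intro source target original changed cost _ hpre
  unfold Spec_minimumCost2 minimumCost2
  simp only
  rw [pv_alt_phases, pv_idx_eq (original ++ changed)]
  have hI := pv_vectexA_inv (original ++ changed)
  have hW0 := pv_winv0 _ hI.1
  have hE : ∀ t ∈ List.zip original (List.zip changed cost),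
      ((pvVectexA (original ++ changed)).getD (PySem.Str.len t.1) PySem.Dict.empty).contains t.1 = true ∧
      ((pvVectexA (original ++ changed)).getD (PySem.Str.len t.1) PySem.Dict.empty).contains t.2.1 = true := by
    intro t ht
    have hlen : t.1.toList.length = t.2.1.toList.length := hpre.1 t ht
    have h1 : t.1 ∈ original := (List.of_mem_zip ht).1
    have h2 : t.2.1 ∈ changed := (List.of_mem_zip (List.of_mem_zip ht).2).1
    have hlt : PySem.Str.len t.2.1 = PySem.Str.len t.1 := by
      simp [PySem.Str.len_eq, hlen]
    refine ⟨pv_vectex_mem _ t.1 (List.mem_append_left _ h1), ?_⟩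
    rw [← hlt]
    exact pv_vectex_mem _ t.2.1 (List.mem_append_right _ h2)
  have hW1 := pv_edges_winv _ (List.zip original (List.zip changed cost)) _ _ hI hW0 hE
  have hW2 := pv_floyd_winv _ _ _ hI.1 hW1
  rw [pv_dp_eq source target _ _ _ hI hW2]
  rw [PySem.Str.len_eq, PySem.List.pyGetD_natCast,
    PySem.List.getD_map_range _ _ _ _ (Nat.lt_succ_self _)]
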